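-- pv_equiv track=rewrite | github.com/FabriceCh/inf8808-projet | data/dataGenerator.py | lifetime_list_to_unit_counts
-- ===== SOURCE A (Python) =====
-- def lifetime_list_to_unit_counts(lifetime_list, duration):
--     born_time = 0
--     died_time = 1
--     counts = []
--     for i in range(duration):
--         count = 0
--         for u in lifetime_list:
--             if u[born_time] <= i < u[died_time]:
--                 count += 1;
--         counts.append(count)
--
--     return counts
-- ===== SOURCE B (Python) =====
-- def lifetime_list_to_unit_counts(lifetime_list, duration):
--     n = duration if duration > 0 else 0
--     diff = [0] * (n + 1)
--     for u in lifetime_list: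
--         lo = u[0] if u[0] > 0 else 0
--         hi = u[1] if u[1] < n else n
--         if lo < hi:
--             diff[lo] += 1
--             diff[hi] -= 1
--     counts = []
--     s = 0
--     for x in diff[:n]:
--         s += x
--         counts.append(s)
--     return counts
-- ===== Notes on version B (the rewrite author's own statement) =====
-- stated objective: faster
-- what changed: Replaces the per-time-step scan of all lifetimes with a difference array (+1 at clamped birth, -1 at clamped death) followed by a single running prefix sum.
import Mathlib
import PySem

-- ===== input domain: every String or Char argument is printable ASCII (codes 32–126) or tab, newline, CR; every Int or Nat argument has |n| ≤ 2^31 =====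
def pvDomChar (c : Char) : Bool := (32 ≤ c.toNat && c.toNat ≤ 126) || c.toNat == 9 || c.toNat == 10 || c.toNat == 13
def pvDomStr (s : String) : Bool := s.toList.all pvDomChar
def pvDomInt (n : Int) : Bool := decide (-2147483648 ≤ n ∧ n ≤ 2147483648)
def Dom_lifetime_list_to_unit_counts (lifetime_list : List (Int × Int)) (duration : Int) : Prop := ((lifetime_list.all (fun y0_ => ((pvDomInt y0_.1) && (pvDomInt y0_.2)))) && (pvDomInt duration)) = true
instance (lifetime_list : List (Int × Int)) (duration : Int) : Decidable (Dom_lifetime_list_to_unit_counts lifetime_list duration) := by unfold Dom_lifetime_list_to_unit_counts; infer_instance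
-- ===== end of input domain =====

-- B replaces A's per-time-step scan of all lifetimes by a difference array and one
-- prefix-sum pass: O(duration+n) instead of O(duration*n). Same return value everywhere.

-- ===== PORT A =====
-- for i in range(duration): count = 0; for u in lifetime_list: if u[0] <= i < u[1]: count += 1; counts.append(count)
def lifetime_list_to_unit_counts (lifetime_list : List (Int × Int)) (duration : Int) : List Int :=
  (PySem.List.pyRange 0 duration 1).foldl
    (fun counts i =>
      counts ++ [lifetime_list.foldl
        (fun count u => if u.1 ≤ i ∧ i < u.2 then count + 1 else count) 0])
    []

-- ===== PORT B =====
-- one loop body of Source B: clamp the interval to [0, n) and mark the difference array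
-- (indices are proved in range inside the branch: 0 ≤ lo < hi ≤ n, so .toNat is exact)
def bStep (n : Int) (diff : List Int) (u : Int × Int) : List Int :=
  let lo := if 0 < u.1 then u.1 else 0
  let hi := if u.2 < n then u.2 else n
  if lo < hi then
    let d1 := diff.set lo.toNat (diff.getD lo.toNat 0 + 1)
    d1.set hi.toNat (d1.getD hi.toNat 0 - 1)
  else diff

def lifetime_list_to_unit_counts_alt (lifetime_list : List (Int × Int)) (duration : Int) : List Int :=
  let n : Int := if 0 < duration then duration else 0
  let diff := lifetime_list.foldl (bStep n) (List.replicate (n.toNat + 1) 0)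
  ((diff.take n.toNat).foldl
    (fun (acc : List Int × Int) x => (acc.1 ++ [acc.2 + x], acc.2 + x)) ([], 0)).1

-- ===== PRECONDITION & SPEC =====
def Spec_lifetime_list_to_unit_counts (lifetime_list : List (Int × Int)) (duration : Int) (out : List Int) : Prop := out = lifetime_list_to_unit_counts_alt lifetime_list duration
instance (lifetime_list : List (Int × Int)) (duration : Int) (out : List Int) : Decidable (Spec_lifetime_list_to_unit_counts lifetime_list duration out) := by unfold Spec_lifetime_list_to_unit_counts; infer_instance

-- ===== CLAIM (what is proved, stated in full; the proofs are below) =====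
def Claim_equal_lifetime_list_to_unit_counts : Prop := ∀ (lifetime_list : List (Int × Int)) (duration : Int), Dom_lifetime_list_to_unit_counts lifetime_list duration → Spec_lifetime_list_to_unit_counts lifetime_list duration (lifetime_list_to_unit_counts lifetime_list duration)

-- ===== LEMMAS AND PROOFS =====

-- prefix sum of the first m entries, as a Finset sum
def prefS (m : Nat) (d : List Int) : Int := ∑ j ∈ Finset.range m, d.getD j 0

-- A's inner loop, as a function of the time step
def countA (L : List (Int × Int)) (i : Int) : Int :=
  L.foldl (fun count u => if u.1 ≤ i ∧ i < u.2 then count + 1 else count) 0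

theorem countA_shift (L : List (Int × Int)) (i : Int) (c : Int) :
    L.foldl (fun count u => if u.1 ≤ i ∧ i < u.2 then count + 1 else count) c
      = c + countA L i := by
  induction L generalizing c with
  | nil => simp [countA]
  | cons u t ih =>
    unfold countA
    rw [List.foldl_cons, List.foldl_cons, ih, ih]
    by_cases h : u.1 ≤ i ∧ i < u.2
    · simp only [if_pos h]; ring
    · simp only [if_neg h]; ring

theorem countA_cons (u : Int × Int) (t : List (Int × Int)) (i : Int) :
    countA (u :: t) i = (if u.1 ≤ i ∧ i < u.2 then 1 else 0) + countA t i := by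
  have h0 : countA (u :: t) i
      = (if u.1 ≤ i ∧ i < u.2 then (0 : Int) + 1 else 0) + countA t i := by
    rw [countA, List.foldl_cons, countA_shift]
  rw [h0]
  by_cases h : u.1 ≤ i ∧ i < u.2
  · rw [if_pos h, if_pos h]; norm_num
  · rw [if_neg h, if_neg h]

theorem foldl_append_map {α : Type} (xs : List α) (g : α → Int) (init : List Int) :
    xs.foldl (fun acc i => acc ++ [g i]) init = init ++ xs.map g := by
  induction xs generalizing init with
  | nil => simp
  | cons x t ih => simp [ih]

theorem runfold_eq (xs : List Int) (out : List Int) (s : Int) :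
    (xs.foldl (fun (acc : List Int × Int) x => (acc.1 ++ [acc.2 + x], acc.2 + x)) (out, s)).1
      = out ++ (List.range xs.length).map (fun k => s + (xs.take (k + 1)).sum) := by
  induction xs generalizing out s with
  | nil => simp
  | cons x t ih =>
    simp only [List.foldl_cons, ih, List.length_cons, List.range_succ_eq_map, List.map_cons,
      List.map_map, List.append_assoc, List.singleton_append]
    congr 1
    congr 1
    · simp
    · apply List.map_congr_left
      intro k _
      simp only [Function.comp_apply, List.take_succ_cons, List.sum_cons, Nat.succ_eq_add_one]
      ring

theorem sum_take_prefS (d : List Int) (m : Nat) : (d.take m).sum = prefS m d := by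
  induction m with
  | zero => simp [prefS]
  | succ m ih =>
    rw [List.take_add_one, List.sum_append, ih, prefS, prefS, Finset.sum_range_succ]
    congr 1
    rcases h : d[m]? with _ | v
    · simp [List.getD_eq_getElem?_getD, h]
    · simp [List.getD_eq_getElem?_getD, h]

theorem prefS_set (d : List Int) (j : Nat) (hj : j < d.length) (v : Int) (m : Nat) :
    prefS m (d.set j (d.getD j 0 + v)) = prefS m d + (if j < m then v else 0) := by
  unfold prefS
  have hpt : ∀ j' : Nat, (d.set j (d.getD j 0 + v)).getD j' 0
      = d.getD j' 0 + (if j' = j then v else 0) := by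
    intro j'
    by_cases h : j' = j
    · subst h
      simp [List.getD_eq_getElem?_getD, hj]
    · simp [List.getD_eq_getElem?_getD, List.getElem?_set_ne (fun hh => h hh.symm), h]
  simp only [hpt]
  rw [Finset.sum_add_distrib, Finset.sum_ite_eq' (Finset.range m) j (fun _ => v)]
  simp [Finset.mem_range]

theorem bStep_length (n : Int) (d : List Int) (u : Int × Int) :
    (bStep n d u).length = d.length := by
  simp only [bStep]
  split_ifs <;> simp

theorem prefS_bStep (n : Int) (hn : 0 ≤ n) (d : List Int) (hd : d.length = n.toNat + 1)
    (u : Int × Int) (k : Nat) (hk : (k : Int) < n) :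
    prefS (k + 1) (bStep n d u)
      = prefS (k + 1) d + (if u.1 ≤ (k : Int) ∧ (k : Int) < u.2 then 1 else 0) := by
  unfold bStep
  set lo := if 0 < u.1 then u.1 else 0 with hlo
  set hi := if u.2 < n then u.2 else n with hhi
  clear_value lo hi
  have hlo0 : 0 ≤ lo := by rw [hlo]; split <;> omega
  have hhin : hi ≤ n := by rw [hhi]; split <;> omega
  by_cases hcase : lo < hi
  · simp only [if_pos hcase]
    have hhi0 : 0 ≤ hi := le_trans hlo0 (le_of_lt hcase)
    have hlolen : lo.toNat < d.length := by omega
    have hhilen : hi.toNat < d.length := by omega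
    rw [show (d.set lo.toNat (d.getD lo.toNat 0 + 1)).getD hi.toNat 0 - 1
        = (d.set lo.toNat (d.getD lo.toNat 0 + 1)).getD hi.toNat 0 + (-1) by ring]
    rw [prefS_set _ _ (by simpa using hhilen) (-1), prefS_set _ _ hlolen 1]
    have h1 : lo.toNat < k + 1 ↔ lo ≤ (k : Int) := by omega
    have h2 : hi.toNat < k + 1 ↔ hi ≤ (k : Int) := by omega
    have h3 : (u.1 ≤ (k : Int) ∧ (k : Int) < u.2) ↔ (lo ≤ (k : Int) ∧ ¬ hi ≤ (k : Int)) := by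
      rw [hlo, hhi]
      constructor
      · rintro ⟨ha, hb⟩; constructor <;> split <;> omega
      · rintro ⟨ha, hb⟩
        constructor
        · revert ha; split <;> omega
        · revert hb; split <;> omega
    simp only [h1, h2, h3]
    split_ifs with p1 p2 p3 <;> (first | (exfalso; omega) | ring)
  · simp only [if_neg hcase]
    have hnot : ¬ (u.1 ≤ (k : Int) ∧ (k : Int) < u.2) := by
      rintro ⟨ha, hb⟩
      apply hcase
      rw [hlo, hhi]
      split_ifs <;> omega
    rw [if_neg hnot]; ring

theorem foldl_bStep_length (n : Int) (L : List (Int × Int)) (d : List Int) :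
    (L.foldl (bStep n) d).length = d.length := by
  induction L generalizing d with
  | nil => rfl
  | cons u t ih => simp [List.foldl_cons, ih, bStep_length]

theorem prefS_foldl (n : Int) (hn : 0 ≤ n) (L : List (Int × Int)) (d : List Int)
    (hd : d.length = n.toNat + 1) (k : Nat) (hk : (k : Int) < n) :
    prefS (k + 1) (L.foldl (bStep n) d) = prefS (k + 1) d + countA L (k : Int) := by
  induction L generalizing d with
  | nil => simp [countA]
  | cons u t ih =>
    rw [List.foldl_cons, ih (bStep n d u) (by rw [bStep_length]; exact hd),
      prefS_bStep n hn d hd u k hk]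
    rw [countA_cons]; ring

theorem prefS_replicate_zero (m N : Nat) : prefS m (List.replicate N (0 : Int)) = 0 := by
  unfold prefS
  apply Finset.sum_eq_zero
  intro j _
  rcases Nat.lt_or_ge j N with h | h
  · simp [List.getD_eq_getElem?_getD, h]
  · simp [List.getD_eq_getElem?_getD, Nat.not_lt.mpr h]

-- ===== VERDICT (by name: the statement is the Claim_ definition above) =====
theorem lifetime_list_to_unit_counts_spec : Claim_equal_lifetime_list_to_unit_counts := by
  intro L duration _dom
  unfold Spec_lifetime_list_to_unit_counts
  simp only [lifetime_list_to_unit_counts, lifetime_list_to_unit_counts_alt]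
  set n : Int := if 0 < duration then duration else 0 with hn
  have hn0 : 0 ≤ n := by rw [hn]; split <;> omega
  have hdur : (duration - 0).toNat = n.toNat := by rw [hn]; split <;> omega
  have hlen : (L.foldl (bStep n) (List.replicate (n.toNat + 1) (0 : Int))).length
      = n.toNat + 1 := by rw [foldl_bStep_length]; simp
  rw [PySem.List.pyRange_one, hdur, foldl_append_map, runfold_eq, List.length_take, hlen,
    min_eq_left (Nat.le_succ _), List.map_map]
  simp only [List.nil_append, zero_add]
  apply List.map_congr_left
  intro k hk
  rw [List.mem_range] at hk
  simp only [Function.comp_apply]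
  rw [List.take_take, min_eq_left (by omega : k + 1 ≤ n.toNat), sum_take_prefS,
    prefS_foldl n hn0 L _ (by simp) k (by omega), prefS_replicate_zero]
  simp only [zero_add, countA]
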